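-- pv_equiv track=rewrite | github.com/jcolinpatrick/kryptos | scripts/e_team_artifact_cross.py | column_first_perm
-- ===== SOURCE A (Python) =====
-- def column_first_perm(rows, cols, length=97):
--     perm = []
--     for c in range(cols):
--         for r in range(rows):
--             pos = r * cols + c
--             if pos < length:
--                 perm.append(pos)
--     return perm
-- ===== SOURCE B (Python) =====
-- def column_first_perm(rows, cols, length=97):
--     perm = []
--     for c in range(cols):
--         n = min(rows, (length - c - 1) // cols + 1)
--         if n > 0:
--             perm.extend(range(c, c + n * cols, cols))
--     return perm
-- ===== Notes on version B (the rewrite author's own statement) =====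
-- stated objective: faster
-- what changed: Replaces A's inner loop over all rows with a closed-form count of valid rows per column (floor division) and a single stepped range per column.
import Mathlib
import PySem

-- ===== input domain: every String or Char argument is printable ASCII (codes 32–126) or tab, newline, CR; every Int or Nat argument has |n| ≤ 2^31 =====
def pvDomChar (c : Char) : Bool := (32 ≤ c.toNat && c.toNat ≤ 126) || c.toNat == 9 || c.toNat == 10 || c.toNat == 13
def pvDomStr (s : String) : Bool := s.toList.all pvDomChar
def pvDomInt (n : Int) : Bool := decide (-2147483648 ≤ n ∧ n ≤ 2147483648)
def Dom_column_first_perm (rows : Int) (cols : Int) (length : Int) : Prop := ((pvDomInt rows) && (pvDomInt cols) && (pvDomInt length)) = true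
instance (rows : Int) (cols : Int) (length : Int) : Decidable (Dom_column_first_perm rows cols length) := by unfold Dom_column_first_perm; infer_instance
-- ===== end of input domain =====

-- B replaces A's inner row loop by a closed-form count of valid rows per column and a single
-- range() extension (objective: faster, O(cols + output) instead of O(rows*cols)).

-- ===== PORT A =====
def column_first_perm (rows : Int) (cols : Int) (length : Int) : List Int :=
  (PySem.List.pyRange 0 cols 1).foldl (fun perm c =>
    (PySem.List.pyRange 0 rows 1).foldl (fun perm r =>
      if r * cols + c < length then perm ++ [r * cols + c] else perm) perm) []

-- ===== PORT B =====
def column_first_perm_alt (rows : Int) (cols : Int) (length : Int) : List Int :=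
  (PySem.List.pyRange 0 cols 1).foldl (fun perm c =>
    let n := min rows (PySem.Int.floordiv (length - c - 1) cols + 1)
    if 0 < n then perm ++ PySem.List.pyRange c (c + n * cols) cols else perm) []

-- ===== PRECONDITION & SPEC =====
def Spec_column_first_perm (rows : Int) (cols : Int) (length : Int) (out : List Int) : Prop := out = column_first_perm_alt rows cols length
instance (rows : Int) (cols : Int) (length : Int) (out : List Int) : Decidable (Spec_column_first_perm rows cols length out) := by unfold Spec_column_first_perm; infer_instance

-- ===== CLAIM (what is proved, stated in full; the proofs are below) =====
def Claim_equal_column_first_perm : Prop := ∀ (rows : Int) (cols : Int) (length : Int), Dom_column_first_perm rows cols length → Spec_column_first_perm rows cols length (column_first_perm rows cols length)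

-- ===== LEMMAS AND PROOFS =====

theorem range_filter_lt (M N : Nat) :
    (List.range M).filter (fun k => decide (k < N)) = List.range (min M N) := by
  induction M with
  | zero => simp
  | succ m ih =>
    rw [List.range_succ, List.filter_append, ih]
    by_cases h : m < N
    · have : min (m + 1) N = min m N + 1 := by omega
      rw [this, List.range_succ]
      simp [h]
      omega
    · have : min (m + 1) N = min m N := by omega
      rw [this]
      simp [h]

-- the list A's inner loop appends for one column c equals B's single range() for that column
theorem col_eq (rows cols length c : Int) (hcols : 0 < cols) :
    ((PySem.List.pyRange 0 rows 1).filter (fun r => decide (r * cols + c < length))).map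
        (fun r => r * cols + c)
      = (if 0 < min rows (PySem.Int.floordiv (length - c - 1) cols + 1)
         then PySem.List.pyRange c (c + (min rows (PySem.Int.floordiv (length - c - 1) cols + 1)) * cols) cols
         else []) := by
  set q : Int := PySem.Int.floordiv (length - c - 1) cols with hq
  set nI : Int := min rows (q + 1) with hn
  -- LHS: unfold the 0..rows range and push map/filter through
  rw [PySem.List.pyRange_one, List.filter_map, List.map_map]
  have hfc : ∀ k ∈ List.range (rows - 0).toNat,
      (((fun r => decide (r * cols + c < length)) ∘ fun k : Nat => 0 + (k : Int)) k)
        = decide (k < nI.toNat) := by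
    intro k hk
    rw [List.mem_range] at hk
    simp only [Function.comp, zero_add, decide_eq_decide]
    have h1 := PySem.Int.le_floordiv_iff_mul_le (a := length - c - 1) (b := cols) (q := (k : Int)) hcols
    rw [← hq] at h1
    omega
  rw [List.filter_congr hfc, range_filter_lt]
  have hmin : min (rows - 0).toNat nI.toNat = nI.toNat := by omega
  rw [hmin]
  by_cases hpos : 0 < nI
  · rw [if_pos hpos, PySem.List.pyRange_of_pos c (c + nI * cols) hcols]
    have hlt : c < c + nI * cols := by
      have := mul_pos hpos hcols; omega
    rw [if_pos hlt]
    have hdiv : ((c + nI * cols - c + cols - 1) / cols).toNat = nI.toNat := by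
      have h2 : c + nI * cols - c + cols - 1 = (cols - 1) + nI * cols := by ring
      rw [h2, Int.add_mul_ediv_right _ _ (by omega : cols ≠ 0),
          Int.ediv_eq_zero_of_lt (by omega) (by omega)]
      omega
    rw [hdiv]
    apply List.map_congr_left
    intro k _
    simp only [Function.comp]
    ring
  · rw [if_neg hpos]
    have : nI.toNat = 0 := by omega
    rw [this]
    simp

-- ===== VERDICT (by name: the statement is the Claim_ definition above) =====
theorem column_first_perm_spec : Claim_equal_column_first_perm := by
  intro rows cols length _
  unfold Spec_column_first_perm column_first_perm column_first_perm_alt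
  by_cases hcols : 0 < cols
  · apply PySem.List.foldl_congr_mem
    intro perm c hc
    rw [PySem.List.mem_pyRange_one] at hc
    rw [PySem.List.foldl_append_ite (fun r => r * cols + c < length) (fun r => r * cols + c),
        col_eq rows cols length c hcols]
    split_ifs with hn
    · rw [if_pos hn]
    · rw [if_neg hn, List.append_nil]
  · rw [PySem.List.pyRange_one_eq_nil (a := 0) (b := cols) (by omega)]
    rfl
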